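-- pv_equiv track=rewrite | github.com/kser93/comp_sys | logic/threads.py | connections_between_threads
-- ===== SOURCE A (Python) =====
-- def connections_between_threads(edges, threads):
--
--     def connection_cost_between_two_threads(t1, t2):
--         return 0 if t1 is t2 else max(
--             [edges[i-1][j-1] for i in t1['elements'] for j in t2['elements'] if edges[i-1][j-1]],
--             default=None
--         )
--
--     return [
--         [
--             connection_cost_between_two_threads(t1, t2)
--             for t2 in threads
--         ]
--         for t1 in threads
--     ]
-- ===== SOURCE B (Python) =====
-- def connections_between_threads(edges, threads):
--     n = len(threads)
--     # identity-based: same thread object => 0, otherwise start unknown (None)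
--     result = [[0 if threads[i] is threads[j] else None for j in range(n)]
--               for i in range(n)]
--     # index map: element id -> positions of the threads containing it
--     owner = {}
--     for idx, t in enumerate(threads):
--         for a in t.get('elements', []):
--             owner[a] = owner.get(a, []) + [idx]
--     items = list(owner.items())
--     # scatter every nonzero edge weight into the cells of the pairs it connects
--     for a, rows in items:
--         for b, cols in items:
--             pairs = [(i, j) for i in rows for j in cols
--                      if threads[i] is not threads[j]]
--             if pairs:
--                 w = edges[a - 1][b - 1]
--                 if w:
--                     for i, j in pairs:
--                         cur = result[i][j]
--                         result[i][j] = w if cur is None else max(cur, w)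
--     return result
-- ===== Notes on version B (the rewrite author's own statement) =====
-- stated objective: alternative
-- what changed: Instead of gathering, per ordered thread pair, the max over a rebuilt list of nonzero edge weights, B builds an element->thread-positions index once and makes one pass over pairs of index entries, scattering each nonzero edge weight into the affected result cells with a running max.
import Mathlib
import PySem

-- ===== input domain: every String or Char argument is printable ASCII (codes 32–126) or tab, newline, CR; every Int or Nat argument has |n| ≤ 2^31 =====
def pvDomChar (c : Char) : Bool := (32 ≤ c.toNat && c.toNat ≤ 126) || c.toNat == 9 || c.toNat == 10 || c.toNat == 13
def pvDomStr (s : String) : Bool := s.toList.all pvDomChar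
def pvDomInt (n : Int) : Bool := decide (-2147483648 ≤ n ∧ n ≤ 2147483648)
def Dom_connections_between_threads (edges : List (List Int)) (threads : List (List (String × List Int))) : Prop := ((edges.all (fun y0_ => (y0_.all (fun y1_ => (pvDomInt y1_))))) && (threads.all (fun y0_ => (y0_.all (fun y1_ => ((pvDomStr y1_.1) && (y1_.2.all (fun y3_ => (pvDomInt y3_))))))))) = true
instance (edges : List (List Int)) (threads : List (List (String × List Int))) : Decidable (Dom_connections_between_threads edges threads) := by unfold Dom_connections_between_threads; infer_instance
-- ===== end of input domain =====

-- B replaces A's per-pair gather (max over a rebuilt weight list for every ordered thread pair)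
-- by an element->thread-positions index built once, plus a single scatter pass over pairs of
-- index entries updating the result matrix with a running max (objective: alternative).


-- shared helpers (used by both ports and by Pre_; `t['elements']` resp. `t.get('elements', [])`
-- and the edge lookup `edges[i-1][j-1]`; totalized with defaults, exact under Pre_)
def pvElems (t : List (String × List Int)) : List Int :=
  (PySem.Dict.mk t).getD "elements" []
def pvWt (edges : List (List Int)) (a b : Int) : Int :=
  PySem.List.pyGetD (PySem.List.pyGetD edges (a - 1) []) (b - 1) 0

-- ===== PORT A =====
-- Python's `t1 is t2` is modeled as equality of list positions (each list entry is a fresh object).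
def connections_between_threads (edges : List (List Int)) (threads : List (List (String × List Int))) : List (List (Option Int)) :=
  (PySem.List.enumerate threads).map (fun p1 =>
    (PySem.List.enumerate threads).map (fun p2 =>
      if p1.1 = p2.1 then some 0
      else PySem.List.max?
        ((pvElems p1.2).flatMap (fun i =>
          ((pvElems p2.2).map (fun j => pvWt edges i j)).filter (fun w => w ≠ 0)))
        id))

-- ===== PORT B =====
def connections_between_threads_alt (edges : List (List Int)) (threads : List (List (String × List Int))) : List (List (Option Int)) :=
  let n : Int := PySem.List.len threads
  let result0 : List (List (Option Int)) :=
    (PySem.List.pyRange 0 n 1).map (fun i =>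
      (PySem.List.pyRange 0 n 1).map (fun j =>
        if i = j then some 0 else (none : Option Int)))
  let owner : PySem.Dict Int (List Int) :=
    (PySem.List.enumerate threads).foldl (fun d p =>
      (pvElems p.2).foldl (fun d a => d.insert a (d.getD a [] ++ [p.1])) d)
      PySem.Dict.empty
  let items := owner.items
  items.foldl (fun res pa =>
    items.foldl (fun res pb =>
      let pairs : List (Int × Int) :=
        pa.2.flatMap (fun i => (pb.2.filter (fun j => j ≠ i)).map (fun j => (i, j)))
      if pairs.isEmpty then res
      else
        let w := pvWt edges pa.1 pb.1
        if w = 0 then res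
        else
          pairs.foldl (fun res ij =>
            let row := PySem.List.pyGetD res ij.1 []
            let cur := PySem.List.pyGetD row ij.2 none
            let v : Option Int := match cur with
              | none => some w
              | some c => some (max c w)
            PySem.List.pySetD res ij.1 (PySem.List.pySetD row ij.2 v)) res) res)
    result0

-- ===== PRECONDITION & SPEC =====
-- Pre_ excludes exactly the inputs where Python A raises: a thread (at a position that forms a
-- distinct ordered pair) missing the 'elements' key (KeyError), or an element pair whose
-- edges[i-1][j-1] lookup is out of range (IndexError).
def Pre_connections_between_threads (edges : List (List Int)) (threads : List (List (String × List Int))) : Prop :=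
  ∀ p1 ∈ PySem.List.enumerate threads, ∀ p2 ∈ PySem.List.enumerate threads, p1.1 ≠ p2.1 →
    (PySem.Dict.mk p1.2).contains "elements" = true ∧
    ∀ i ∈ pvElems p1.2, ∀ j ∈ pvElems p2.2,
      PySem.Raise.InRange edges.length (i - 1) ∧
      PySem.Raise.InRange (PySem.List.pyGetD edges (i - 1) []).length (j - 1)
instance (edges : List (List Int)) (threads : List (List (String × List Int))) : Decidable (Pre_connections_between_threads edges threads) := by unfold Pre_connections_between_threads; infer_instance

def pvWitness_connections_between_threads : List (List Int) × (List (List (String × List Int))) :=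
  ([[5, 0], [0, -2]], [[("elements", [1])], [("elements", [2, 1])]])

def Spec_connections_between_threads (edges : List (List Int)) (threads : List (List (String × List Int))) (out : List (List (Option Int))) : Prop := out = connections_between_threads_alt edges threads
instance (edges : List (List Int)) (threads : List (List (String × List Int))) (out : List (List (Option Int))) : Decidable (Spec_connections_between_threads edges threads out) := by unfold Spec_connections_between_threads; infer_instance

-- ===== CLAIM (what is proved, stated in full; the proofs are below) =====
def Claim_equal_connections_between_threads : Prop := ∀ (edges : List (List Int)) (threads : List (List (String × List Int))), Dom_connections_between_threads edges threads → Pre_connections_between_threads edges threads → Spec_connections_between_threads edges threads (connections_between_threads edges threads)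

-- ===== LEMMAS AND PROOFS =====

-- the running-max combiner the B updater applies to a cell
def pvCmb (c : Option Int) (w : Int) : Option Int :=
  match c with
  | none => some w
  | some c => some (max c w)

-- one scatter update ((i, j), w) applied to the result matrix (B's inner loop body)
def pvStep (res : List (List (Option Int))) (u : (Int × Int) × Int) : List (List (Option Int)) :=
  PySem.List.pySetD res u.1.1
    (PySem.List.pySetD (PySem.List.pyGetD res u.1.1 []) u.1.2
      (pvCmb (PySem.List.pyGetD (PySem.List.pyGetD res u.1.1 []) u.1.2 none) u.2))

def pvShape (n : Nat) (M : List (List (Option Int))) : Prop :=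
  M.length = n ∧ ∀ r ∈ M, r.length = n

def pvCell (M : List (List (Option Int))) (i j : Nat) : Option Int :=
  (M.getD i []).getD j none

def pvInit (n : Int) : List (List (Option Int)) :=
  (PySem.List.pyRange 0 n 1).map (fun i =>
    (PySem.List.pyRange 0 n 1).map (fun j => if i = j then some 0 else (none : Option Int)))

def pvOwner (threads : List (List (String × List Int))) : PySem.Dict Int (List Int) :=
  (PySem.List.enumerate threads).foldl (fun d p =>
    (pvElems p.2).foldl (fun d a => d.insert a (d.getD a [] ++ [p.1])) d)
    PySem.Dict.empty

def pvPairs (rows cols : List Int) : List (Int × Int) :=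
  rows.flatMap (fun i => (cols.filter (fun j => j ≠ i)).map (fun j => (i, j)))

def pvBigL (edges : List (List Int)) (items : List (Int × List Int)) : List ((Int × Int) × Int) :=
  items.flatMap (fun pa => items.flatMap (fun pb =>
    let pairs := pvPairs pa.2 pb.2
    if pairs.isEmpty then []
    else if pvWt edges pa.1 pb.1 = 0 then []
    else pairs.map (fun ij => (ij, pvWt edges pa.1 pb.1))))

-- the weight list A's comprehension builds for one ordered pair of threads
def pvAList (edges : List (List Int)) (t1 t2 : List (String × List Int)) : List Int :=
  (pvElems t1).flatMap (fun i =>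
    ((pvElems t2).map (fun j => pvWt edges i j)).filter (fun w => w ≠ 0))

-- B's nested loops are one fold of pvStep over the flattened update list
lemma altB_eq (edges : List (List Int)) (threads : List (List (String × List Int))) :
    connections_between_threads_alt edges threads =
      (pvBigL edges (pvOwner threads).items).foldl pvStep (pvInit (PySem.List.len threads)) := by
  unfold connections_between_threads_alt pvBigL pvOwner pvInit pvPairs
  rw [List.foldl_flatMap]
  apply PySem.List.foldl_congr_mem
  intro acc pa _
  rw [List.foldl_flatMap]
  apply PySem.List.foldl_congr_mem
  intro res pb _
  by_cases hemp : (pa.2.flatMap (fun i => (pb.2.filter (fun j => j ≠ i)).map (fun j => (i, j)))).isEmpty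
  · rw [if_pos hemp, if_pos hemp]; rfl
  · rw [if_neg hemp, if_neg hemp]
    by_cases hw : pvWt edges pa.1 pb.1 = 0
    · rw [if_pos hw, if_pos hw]; rfl
    · rw [if_neg hw, if_neg hw, List.foldl_map]
      apply PySem.List.foldl_congr_mem
      intro acc2 ij _
      rfl

-- characterization of a fold of pvCmb from none
lemma foldl_cmb_some (l : List Int) : ∀ c : Int,
    ∃ m, l.foldl pvCmb (some c) = some m ∧ (m = c ∨ m ∈ l) ∧ c ≤ m ∧ ∀ x ∈ l, x ≤ m := by
  induction l with
  | nil => intro c; exact ⟨c, rfl, Or.inl rfl, le_refl _, by simp⟩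
  | cons y t ih =>
    intro c
    obtain ⟨m, hm, hmem, hle, hbd⟩ := ih (max c y)
    refine ⟨m, hm, ?_, le_trans (le_max_left _ _) hle, ?_⟩
    · rcases hmem with h | h
      · rcases max_choice c y with hh | hh <;> simp [h, hh]
      · exact Or.inr (List.mem_cons_of_mem _ h)
    · intro x hx
      rcases List.mem_cons.mp hx with rfl | hx
      · exact le_trans (le_max_right _ _) hle
      · exact hbd x hx

lemma foldl_cmb_char (l : List Int) :
    (l = [] ∧ l.foldl pvCmb none = none) ∨
      (∃ m, l.foldl pvCmb none = some m ∧ m ∈ l ∧ ∀ x ∈ l, x ≤ m) := by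
  cases l with
  | nil => exact Or.inl ⟨rfl, rfl⟩
  | cons y t =>
    right
    obtain ⟨m, hm, hmem, hle, hbd⟩ := foldl_cmb_some t y
    refine ⟨m, hm, ?_, ?_⟩
    · rcases hmem with rfl | h
      · exact List.mem_cons_self
      · exact List.mem_cons_of_mem _ h
    · intro x hx
      rcases List.mem_cons.mp hx with rfl | hx
      · exact hle
      · exact hbd x hx

lemma foldl_cmb_congr (l1 l2 : List Int) (h : ∀ x, x ∈ l1 ↔ x ∈ l2) :
    l1.foldl pvCmb none = l2.foldl pvCmb none := by
  rcases foldl_cmb_char l1 with ⟨h1, e1⟩ | ⟨m1, e1, hm1, hb1⟩ <;>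
    rcases foldl_cmb_char l2 with ⟨h2, e2⟩ | ⟨m2, e2, hm2, hb2⟩
  · rw [e1, e2]
  · exact absurd ((h m2).mpr hm2) (by simp [h1])
  · exact absurd ((h m1).mp hm1) (by simp [h2])
  · rw [e1, e2, le_antisymm (hb2 m1 ((h m1).mp hm1)) (hb1 m2 ((h m2).mpr hm2))]

-- Python max(list, default=None) is the same fold
lemma max?_eq_foldl_cmb (l : List Int) : PySem.List.max? l id = l.foldl pvCmb none := by
  unfold PySem.List.max?
  congr 1
  funext acc x
  cases acc with
  | none => rfl
  | some m =>
    simp only [pvCmb, id]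
    split_ifs with h <;> simp <;> omega

lemma shape_pvInit (n : Nat) : pvShape n (pvInit (n : Int)) := by
  constructor
  · simp [pvInit, PySem.List.length_pyRange_one]
  · intro r hr
    simp only [pvInit, List.mem_map] at hr
    obtain ⟨i, _, rfl⟩ := hr
    simp [PySem.List.length_pyRange_one]

lemma getD_map_pyRange2 {β : Type} (f : Int → β) (n i : Nat) (d : β) (hi : i < n) :
    ((PySem.List.pyRange 0 (n : Int) 1).map f).getD i d = f (i : Int) := by
  rw [← PySem.List.pyGetD_natCast]
  exact PySem.List.pyGetD_map_pyRange f n i d hi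

lemma cell_pvInit (n i j : Nat) (hi : i < n) (hj : j < n) :
    pvCell (pvInit (n : Int)) i j = if i = j then some 0 else none := by
  unfold pvCell pvInit
  rw [getD_map_pyRange2 _ n i [] hi, getD_map_pyRange2 _ n j none hj]
  by_cases h : i = j <;> simp [h]

lemma getD_set_row (M : List (List (Option Int))) (a i : Nat) (R : List (Option Int)) :
    (M.set a R).getD i [] = if a = i ∧ a < M.length then R else M.getD i [] := by
  simp only [List.getD_eq_getElem?_getD, List.getElem?_set]
  split_ifs <;> simp_all <;> omega

lemma shape_step (n : Nat) (M : List (List (Option Int))) (u : (Int × Int) × Int)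
    (hM : pvShape n M) (h1 : 0 ≤ u.1.1) (h2 : u.1.1 < (n : Int))
    (h3 : 0 ≤ u.1.2) (h4 : u.1.2 < (n : Int)) : pvShape n (pvStep M u) := by
  obtain ⟨hlen, hrow⟩ := hM
  have ea : u.1.1 = ((u.1.1.toNat : Nat) : Int) := (Int.toNat_of_nonneg h1).symm
  have eb : u.1.2 = ((u.1.2.toNat : Nat) : Int) := (Int.toNat_of_nonneg h3).symm
  unfold pvStep
  rw [ea, eb]
  simp only [PySem.List.pyGetD_natCast, PySem.List.pySetD_natCast]
  constructor
  · simp [hlen]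
  · intro r hr
    rcases List.mem_or_eq_of_mem_set hr with h | rfl
    · exact hrow r h
    · rw [List.length_set]
      have : u.1.1.toNat < M.length := by omega
      have hmem : M.getD u.1.1.toNat [] ∈ M := by
        rw [List.getD_eq_getElem?_getD, List.getElem?_eq_getElem this]
        exact List.getElem_mem this
      exact hrow _ hmem

lemma cell_step (n : Nat) (M : List (List (Option Int))) (u : (Int × Int) × Int)
    (hM : pvShape n M) (h1 : 0 ≤ u.1.1) (h2 : u.1.1 < (n : Int))
    (h3 : 0 ≤ u.1.2) (h4 : u.1.2 < (n : Int)) (i j : Nat) (hi : i < n) (hj : j < n) :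
    pvCell (pvStep M u) i j =
      if u.1.1 = (i : Int) ∧ u.1.2 = (j : Int) then pvCmb (pvCell M i j) u.2
      else pvCell M i j := by
  obtain ⟨hlen, hrow⟩ := hM
  have ea : u.1.1 = ((u.1.1.toNat : Nat) : Int) := (Int.toNat_of_nonneg h1).symm
  have eb : u.1.2 = ((u.1.2.toNat : Nat) : Int) := (Int.toNat_of_nonneg h3).symm
  have ha : u.1.1.toNat < M.length := by omega
  have hb : u.1.2.toNat < n := by omega
  unfold pvStep pvCell
  rw [ea, eb]
  simp only [PySem.List.pyGetD_natCast, PySem.List.pySetD_natCast]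
  rw [getD_set_row]
  have hrl : (M.getD u.1.1.toNat []).length = n := by
    refine hrow _ ?_
    rw [List.getD_eq_getElem?_getD, List.getElem?_eq_getElem ha]
    exact List.getElem_mem ha
  by_cases hai : u.1.1.toNat = i
  · subst hai
    rw [if_pos ⟨rfl, ha⟩]
    by_cases hbj : u.1.2.toNat = j
    · subst hbj
      rw [if_pos ⟨rfl, rfl⟩]
      simp only [List.getD_eq_getElem?_getD, List.getElem?_set] at *
      simp [hrl, hb]
    · have hc : ¬(((u.1.1.toNat : Nat) : Int) = ((u.1.1.toNat : Nat) : Int) ∧ ((u.1.2.toNat : Nat) : Int) = ((j : Nat) : Int)) := by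
        rintro ⟨-, hx⟩; omega
      rw [if_neg hc]
      simp only [List.getD_eq_getElem?_getD, List.getElem?_set]
      simp [hbj]
  · have hc : ¬(((u.1.1.toNat : Nat) : Int) = ((i : Nat) : Int) ∧ ((u.1.2.toNat : Nat) : Int) = ((j : Nat) : Int)) := by
      rintro ⟨hx, -⟩; omega
    rw [if_neg (by rintro ⟨hx, -⟩; omega), if_neg hc]

lemma foldSteps (n : Nat) (L : List ((Int × Int) × Int)) :
    ∀ M, pvShape n M →
    (∀ u ∈ L, 0 ≤ u.1.1 ∧ u.1.1 < (n : Int) ∧ 0 ≤ u.1.2 ∧ u.1.2 < (n : Int)) →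
    pvShape n (L.foldl pvStep M) ∧
      ∀ i j : Nat, i < n → j < n →
        pvCell (L.foldl pvStep M) i j =
          ((L.filter (fun u => u.1.1 = (i : Int) ∧ u.1.2 = (j : Int))).map (·.2)).foldl
            pvCmb (pvCell M i j) := by
  induction L with
  | nil => intro M hM _; exact ⟨hM, fun i j _ _ => rfl⟩
  | cons u t ih =>
    intro M hM hb
    obtain ⟨hu1, hu2, hu3, hu4⟩ := hb u List.mem_cons_self
    have hM' := shape_step n M u hM hu1 hu2 hu3 hu4
    obtain ⟨hsh, hcell⟩ := ih (pvStep M u) hM' (fun v hv => hb v (List.mem_cons_of_mem _ hv))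
    refine ⟨hsh, fun i j hi hj => ?_⟩
    rw [List.foldl_cons, hcell i j hi hj, List.filter_cons]
    by_cases hc : u.1.1 = (i : Int) ∧ u.1.2 = (j : Int)
    · rw [if_pos (by simpa using hc)]
      simp only [List.map_cons, List.foldl_cons]
      rw [cell_step n M u hM hu1 hu2 hu3 hu4 i j hi hj, if_pos hc]
    · rw [if_neg (by simpa using hc)]
      rw [cell_step n M u hM hu1 hu2 hu3 hu4 i j hi hj, if_neg hc]

-- membership in the owner index
lemma inner_mem (idx : Int) (elems : List Int) : ∀ (d : PySem.Dict Int (List Int)) (a x : Int),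
    x ∈ (elems.foldl (fun d a' => d.insert a' (d.getD a' [] ++ [idx])) d).getD a [] ↔
      x ∈ d.getD a [] ∨ (a ∈ elems ∧ x = idx) := by
  induction elems with
  | nil => intro d a x; simp
  | cons e t ih =>
    intro d a x
    rw [List.foldl_cons, ih]
    rw [PySem.Dict.getD_insert]
    by_cases h : a = e
    · subst h
      rw [if_pos rfl]
      simp only [List.mem_append, List.mem_cons, true_or, true_and]
      tauto
    · simp only [if_neg h, List.mem_cons]
      constructor
      · rintro (h1 | ⟨h2, rfl⟩)
        · exact Or.inl h1
        · exact Or.inr ⟨Or.inr h2, rfl⟩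
      · rintro (h1 | ⟨(rfl | h2), rfl⟩)
        · exact Or.inl h1
        · exact absurd rfl h
        · exact Or.inr ⟨h2, rfl⟩

lemma outer_mem (l : List (Int × List (String × List Int))) :
    ∀ (d : PySem.Dict Int (List Int)) (a x : Int),
    x ∈ (l.foldl (fun d p => (pvElems p.2).foldl (fun d a => d.insert a (d.getD a [] ++ [p.1])) d) d).getD a [] ↔
      x ∈ d.getD a [] ∨ ∃ p ∈ l, p.1 = x ∧ a ∈ pvElems p.2 := by
  induction l with
  | nil => intro d a x; simp
  | cons p t ih =>
    intro d a x
    rw [List.foldl_cons, ih, inner_mem]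
    simp only [List.mem_cons]
    constructor
    · rintro (( h | ⟨h1, rfl⟩) | ⟨q, hq, rfl, hq2⟩)
      · exact Or.inl h
      · exact Or.inr ⟨p, Or.inl rfl, rfl, h1⟩
      · exact Or.inr ⟨q, Or.inr hq, rfl, hq2⟩
    · rintro (h | ⟨q, (rfl | hq), rfl, hq2⟩)
      · exact Or.inl (Or.inl h)
      · exact Or.inl (Or.inr ⟨hq2, rfl⟩)
      · exact Or.inr ⟨q, hq, rfl, hq2⟩

lemma owner_mem (threads : List (List (String × List Int))) (a x : Int) :
    x ∈ (pvOwner threads).getD a [] ↔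
      ∃ (k : Nat) (h : k < threads.length), x = (k : Int) ∧ a ∈ pvElems threads[k] := by
  rw [pvOwner, outer_mem]
  simp only [PySem.Dict.getD_empty, List.not_mem_nil, false_or]
  constructor
  · rintro ⟨p, hp, rfl, hmem⟩
    rw [PySem.List.mem_enumerate_iff] at hp
    obtain ⟨k, hk, rfl⟩ := hp
    exact ⟨k, hk, by simp, by simpa using hmem⟩
  · rintro ⟨k, hk, rfl, hmem⟩
    exact ⟨((k : Int), threads[k]), (PySem.List.mem_enumerate_iff _ _ _).mpr ⟨k, hk, by simp⟩, rfl, hmem⟩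

lemma owner_nodup (threads : List (List (String × List Int))) :
    (pvOwner threads).keys.Nodup := by
  rw [pvOwner]
  generalize PySem.List.enumerate threads = l
  have h : ∀ (d : PySem.Dict Int (List Int)), d.keys.Nodup →
      (l.foldl (fun d p => (pvElems p.2).foldl (fun d a => d.insert a (d.getD a [] ++ [p.1])) d) d).keys.Nodup := by
    induction l with
    | nil => intro d hd; exact hd
    | cons p t ih =>
      intro d hd
      rw [List.foldl_cons]
      exact ih _ (PySem.Dict.nodup_keys_foldl_insert _ (fun d a => d.getD a [] ++ [p.1]) d hd)
  exact h _ (by simp [PySem.Dict.empty])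

lemma exists_items_of_mem (threads : List (List (String × List Int))) (a x : Int)
    (h : x ∈ (pvOwner threads).getD a []) :
    ∃ rows, (a, rows) ∈ (pvOwner threads).items ∧ x ∈ rows := by
  rw [PySem.Dict.getD_eq_get?_getD] at h
  cases hx : (pvOwner threads).get? a with
  | none => rw [hx] at h; simp at h
  | some rows =>
    rw [hx] at h
    exact ⟨rows, PySem.Dict.mem_items_of_get?_eq_some _ hx, h⟩

-- full description of the scatter update list
lemma bigL_mem (edges : List (List Int)) (threads : List (List (String × List Int)))
    (u : (Int × Int) × Int) :
    u ∈ pvBigL edges (pvOwner threads).items ↔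
      ∃ (a b : Int) (k l : Nat) (_ : k < threads.length) (_ : l < threads.length),
        k ≠ l ∧ a ∈ pvElems threads[k] ∧ b ∈ pvElems threads[l] ∧
        pvWt edges a b ≠ 0 ∧ u = (((k : Int), (l : Int)), pvWt edges a b) := by
  constructor
  · intro hu
    simp only [pvBigL, List.mem_flatMap] at hu
    obtain ⟨pa, hpa, pb, hpb, hu⟩ := hu
    split_ifs at hu with h1 h2
    · simp at hu
    · simp at hu
    · simp only [List.mem_map] at hu
      obtain ⟨ij, hij, rfl⟩ := hu
      simp only [pvPairs, List.mem_flatMap, List.mem_map, List.mem_filter,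
        decide_eq_true_eq] at hij
      obtain ⟨r, hr, c, ⟨hc, hcr⟩, rfl⟩ := hij
      have hra : pa.2 = (pvOwner threads).getD pa.1 [] :=
        (PySem.Dict.getD_of_mem_items _ (by exact hpa) (owner_nodup threads) []).symm
      have hcb : pb.2 = (pvOwner threads).getD pb.1 [] :=
        (PySem.Dict.getD_of_mem_items _ (by exact hpb) (owner_nodup threads) []).symm
      rw [hra] at hr
      rw [hcb] at hc
      obtain ⟨k, hk, rfl, hka⟩ := (owner_mem threads pa.1 r).mp hr
      obtain ⟨l, hl, rfl, hlb⟩ := (owner_mem threads pb.1 c).mp hc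
      exact ⟨pa.1, pb.1, k, l, hk, hl, fun h => hcr (by rw [h]), hka, hlb, h2, rfl⟩
  · rintro ⟨a, b, k, l, hk, hl, hkl, ha, hb, hw, rfl⟩
    obtain ⟨rows, hrows, hkr⟩ :=
      exists_items_of_mem threads a _ ((owner_mem threads a _).mpr ⟨k, hk, rfl, ha⟩)
    obtain ⟨cols, hcols, hlc⟩ :=
      exists_items_of_mem threads b _ ((owner_mem threads b _).mpr ⟨l, hl, rfl, hb⟩)
    simp only [pvBigL, List.mem_flatMap]
    refine ⟨(a, rows), hrows, (b, cols), hcols, ?_⟩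
    have hij : ((k : Int), (l : Int)) ∈ pvPairs rows cols := by
      simp only [pvPairs, List.mem_flatMap, List.mem_map, List.mem_filter, decide_eq_true_eq]
      exact ⟨(k : Int), hkr, (l : Int), ⟨hlc, by intro h; exact hkl (by exact_mod_cast h.symm)⟩, rfl⟩
    rw [if_neg (by simp [List.isEmpty_iff]; exact List.ne_nil_of_mem hij), if_neg hw]
    exact List.mem_map.mpr ⟨_, hij, rfl⟩

lemma bigL_bounds (edges : List (List Int)) (threads : List (List (String × List Int))) :
    ∀ u ∈ pvBigL edges (pvOwner threads).items,
      0 ≤ u.1.1 ∧ u.1.1 < (threads.length : Int) ∧ 0 ≤ u.1.2 ∧ u.1.2 < (threads.length : Int) := by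
  intro u hu
  obtain ⟨a, b, k, l, hk, hl, -, -, -, -, rfl⟩ := (bigL_mem edges threads u).mp hu
  simp only
  omega

-- membership in the filtered update list for an off-diagonal cell = membership in A's weight list
lemma filtered_mem (edges : List (List Int)) (threads : List (List (String × List Int)))
    (i j : Nat) (hi : i < threads.length) (hj : j < threads.length) (hij : i ≠ j) (x : Int) :
    (x ∈ ((pvBigL edges (pvOwner threads).items).filter
        (fun u => u.1.1 = (i : Int) ∧ u.1.2 = (j : Int))).map (·.2)) ↔
      x ∈ pvAList edges threads[i] threads[j] := by
  rw [List.mem_map]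
  constructor
  · rintro ⟨u, hu, rfl⟩
    rw [List.mem_filter] at hu
    obtain ⟨hu, hP⟩ := hu
    obtain ⟨a, b, k, l, hk, hl, hkl, ha, hb, hw, rfl⟩ := (bigL_mem edges threads u).mp hu
    simp only [decide_eq_true_eq] at hP
    obtain ⟨h1, h2⟩ := hP
    have hki : k = i := by exact_mod_cast h1
    have hlj : l = j := by exact_mod_cast h2
    subst hki; subst hlj
    simp only [pvAList, List.mem_flatMap]
    refine ⟨a, ha, ?_⟩
    rw [List.mem_filter]
    exact ⟨List.mem_map.mpr ⟨b, hb, rfl⟩, by simpa using hw⟩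
  · intro hx
    simp only [pvAList, List.mem_flatMap, List.mem_filter, List.mem_map,
      decide_eq_true_eq] at hx
    obtain ⟨a, ha, ⟨b, hb, rfl⟩, hw⟩ := hx
    refine ⟨(((i : Int), (j : Int)), pvWt edges a b), ?_, rfl⟩
    rw [List.mem_filter]
    constructor
    · exact (bigL_mem edges threads _).mpr ⟨a, b, i, j, hi, hj, hij, ha, hb, hw, rfl⟩
    · simp

-- ===== VERDICT (by name: the statement is the Claim_ definition above) =====
theorem connections_between_threads_spec : Claim_equal_connections_between_threads := by
  intro edges threads _ _
  show connections_between_threads edges threads = connections_between_threads_alt edges threads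
  rw [altB_eq]
  have hlen : PySem.List.len threads = (threads.length : Int) := PySem.List.len_eq threads
  rw [hlen]
  obtain ⟨⟨hL, hRows⟩, hcell⟩ :=
    foldSteps threads.length (pvBigL edges (pvOwner threads).items)
      (pvInit (threads.length : Int)) (shape_pvInit threads.length)
      (bigL_bounds edges threads)
  set B := (pvBigL edges (pvOwner threads).items).foldl pvStep
    (pvInit (threads.length : Int)) with hB
  apply List.ext_getElem?
  intro i
  by_cases hi : i < threads.length
  · have hiB : i < B.length := by omega
    unfold connections_between_threads
    rw [List.getElem?_map, PySem.List.getElem?_enumerate, List.getElem?_eq_getElem hi,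
      Option.map_some, Option.map_some, List.getElem?_eq_getElem hiB, Option.some_inj]
    have hBrowlen : B[i].length = threads.length := hRows B[i] (List.getElem_mem hiB)
    apply List.ext_getElem?
    intro j
    by_cases hj : j < threads.length
    · have hjB : j < B[i].length := by omega
      rw [List.getElem?_map, PySem.List.getElem?_enumerate, List.getElem?_eq_getElem hj,
        Option.map_some, Option.map_some, List.getElem?_eq_getElem hjB, Option.some_inj]
      have hBij : B[i][j] = pvCell B i j := by
        unfold pvCell
        have h1 : B.getD i [] = B[i] := by
          rw [List.getD_eq_getElem?_getD, List.getElem?_eq_getElem hiB]; rfl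
        rw [h1, List.getD_eq_getElem?_getD, List.getElem?_eq_getElem hjB]; rfl
      rw [hBij, hcell i j hi hj, cell_pvInit threads.length i j hi hj]
      simp only [zero_add]
      by_cases hij : i = j
      · subst hij
        rw [if_pos rfl, if_pos rfl]
        have hnil : (pvBigL edges (pvOwner threads).items).filter
            (fun u => u.1.1 = (i : Int) ∧ u.1.2 = (i : Int)) = [] := by
          rw [List.filter_eq_nil_iff]
          intro u hu
          obtain ⟨a, b, k, l, hk, hl, hkl, -, -, -, rfl⟩ := (bigL_mem edges threads u).mp hu
          simp only [decide_eq_true_eq, not_and]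
          intro h1 h2
          exact hkl (by omega)
        rw [hnil]
        rfl
      · rw [if_neg (by exact_mod_cast hij), if_neg hij, max?_eq_foldl_cmb]
        exact foldl_cmb_congr _ _ (fun x => (filtered_mem edges threads i j hi hj hij x).symm)
    · rw [List.getElem?_eq_none (by simp [PySem.List.length_enumerate]; omega),
        List.getElem?_eq_none (by omega)]
  · rw [List.getElem?_eq_none
        (by simp [connections_between_threads, PySem.List.length_enumerate]; omega),
      List.getElem?_eq_none (by omega)]
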